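-- pv_equiv track=rewrite | github.com/Nelson198/LA2 | Problemas/Azul - Brute Force/X.py | aux
-- ===== SOURCE A (Python) =====
-- def complete(u,c,k,s):
--     return len(s) == k
--
-- def extensions(u,c,k,s):
--     return list(x for x in range(0,len(c)) if x not in s)
--
-- def valid(u,c,k,s):
--     r = set()
--     for i in s:
--         r.update(c[i])
--     return r == u
--
-- def aux(u,c,k,s):
--     if complete(u,c,k,s):
--         return valid(u,c,k,s)
--     for x in extensions(u,c,k,s):
--         s.append(x)
--         if aux(u,c,k,s):
--             return True
--         s.pop()
--     return False
-- ===== SOURCE B (Python) =====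
-- def aux(u, c, k, s):
--     # Combination enumeration: choose the remaining subsets by increasing index
--     # (A explores every ordering of the same indices), carrying the union incrementally.
--     need = k - len(s)
--     if need < 0:
--         return False
--     fresh = [x for x in range(len(c)) if x not in s]
--     if len(fresh) < need:
--         return False
--     base = set()
--     for i in s:
--         base |= c[i]
--
--     def go(pos, left, acc):
--         if left == 0:
--             return acc == u
--         for i in range(pos, len(fresh)):
--             if go(i + 1, left - 1, acc | c[fresh[i]]):
--                 return True
--         return False
--
--     return go(0, need, base)
-- ===== Notes on version B (the rewrite author's own statement) =====
-- stated objective: faster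
-- what changed: A backtracks over every ordering (permutation) of distinct fresh indices; B enumerates index combinations in increasing order only, after O(n) feasibility checks, carrying the union incrementally from the union of the already-chosen sets.
import Mathlib
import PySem

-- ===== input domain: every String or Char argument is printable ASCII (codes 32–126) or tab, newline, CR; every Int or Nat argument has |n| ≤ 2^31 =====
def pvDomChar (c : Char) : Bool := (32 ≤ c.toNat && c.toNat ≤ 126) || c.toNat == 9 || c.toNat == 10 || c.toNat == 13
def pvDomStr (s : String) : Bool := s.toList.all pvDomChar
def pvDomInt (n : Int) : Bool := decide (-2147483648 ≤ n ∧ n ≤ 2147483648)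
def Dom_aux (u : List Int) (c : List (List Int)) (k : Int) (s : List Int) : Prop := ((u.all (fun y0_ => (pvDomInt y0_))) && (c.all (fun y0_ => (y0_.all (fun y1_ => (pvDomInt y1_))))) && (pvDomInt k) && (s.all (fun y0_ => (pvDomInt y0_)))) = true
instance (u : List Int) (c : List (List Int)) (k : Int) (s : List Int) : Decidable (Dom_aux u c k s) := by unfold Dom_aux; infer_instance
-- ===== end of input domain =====

-- B replaces A's permutation backtracking (it retries every ordering of the same fresh indices)
-- by combination enumeration in increasing index order with an incrementally carried union.
-- Equivalence is about the RETURN value only: Python A mutates s in place (the chosen indices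
-- remain appended when it returns True); B leaves s unchanged.

-- ===== PORT A =====
-- valid(u,c,k,s): r = set(); for i in s: r.update(c[i]); return r == u   (the loop is unionOf)
def unionOf (c : List (List Int)) (acc : PySem.Set Int) (t : List Int) : PySem.Set Int :=
  t.foldl (fun r i => PySem.Set.update r ((PySem.List.pyGet? c i).getD [])) acc

def pyValid (u : List Int) (c : List (List Int)) (s : List Int) : Bool :=
  PySem.Set.equal (unionOf c PySem.Set.empty s) u

-- extensions(u,c,k,s): list(x for x in range(0,len(c)) if x not in s)
def pyExtensions (c : List (List Int)) (s : List Int) : List Int :=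
  (PySem.List.pyRange 0 (c.length : Int) 1).filter (fun x => !s.contains x)

-- termination measure fact for aux's recursion (cited by decreasing_by)
theorem pyExtensions_append_lt {c : List (List Int)} {s : List Int} {x : Int}
    (hx : x ∈ pyExtensions c s) :
    (pyExtensions c (s ++ [x])).length < (pyExtensions c s).length := by
  have heq : pyExtensions c (s ++ [x]) = (pyExtensions c s).filter (fun y => !(y == x)) := by
    simp only [pyExtensions, List.filter_filter]
    apply List.filter_congr
    intro y _
    by_cases hy : y = x <;> by_cases hys : y ∈ s <;> simp [hy, hys]
  rw [heq, List.length_filter_lt_length_iff_exists]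
  exact ⟨x, hx, by simp⟩

def aux (u : List Int) (c : List (List Int)) (k : Int) (s : List Int) : Bool :=
  if (s.length : Int) == k then pyValid u c s
  else (pyExtensions c s).attach.any (fun x => aux u c k (s ++ [x.1]))
termination_by (pyExtensions c s).length
decreasing_by exact pyExtensions_append_lt x.2

-- ===== PORT B =====
-- go(pos, left, acc): if left == 0: return acc == u
--   for i in range(pos, len(fresh)):
--     if go(i+1, left-1, acc | c[fresh[i]]): return True
--   return False
def goB (u : List Int) (c : List (List Int)) (fresh : List Nat) (pos : Nat) (left : Nat)
    (acc : PySem.Set Int) : Bool :=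
  match left with
  | 0 => PySem.Set.equal acc u
  | l + 1 =>
      (List.range' pos (fresh.length - pos)).any
        (fun i => goB u c fresh (i + 1) l (PySem.Set.union acc (c.getD (fresh.getD i 0) [])))

def aux_alt (u : List Int) (c : List (List Int)) (k : Int) (s : List Int) : Bool :=
  let need := k - (s.length : Int)
  if need < 0 then false
  else
    let fresh : List Nat := (List.range c.length).filter (fun x : Nat => !s.contains (x : Int))
    if (fresh.length : Int) < need then false
    else
      let base := s.foldl (fun r i => PySem.Set.union r ((PySem.List.pyGet? c i).getD [])) PySem.Set.empty
      goB u c fresh 0 need.toNat base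

-- ===== PRECONDITION & SPEC =====
-- Pre_ excludes exactly the inputs where Python A raises IndexError: an out-of-range index in s
-- is actually reached by valid(), i.e. s is no longer than k and enough unused indices remain to
-- complete s to length k.
def Pre_aux (u : List Int) (c : List (List Int)) (k : Int) (s : List Int) : Prop :=
  ¬ ((∃ i ∈ s, i < -(c.length : Int) ∨ (c.length : Int) ≤ i) ∧ (s.length : Int) ≤ k ∧
     k - (s.length : Int) ≤ (((List.range c.length).filter (fun x : Nat => !s.contains (x : Int))).length : Int))
instance (u : List Int) (c : List (List Int)) (k : Int) (s : List Int) : Decidable (Pre_aux u c k s) := by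
  unfold Pre_aux; infer_instance

def pvWitness_aux : List Int × List (List Int) × Int × List Int := ([1, 2], [[1], [2], [5]], 2, [])

def Spec_aux (u : List Int) (c : List (List Int)) (k : Int) (s : List Int) (out : Bool) : Prop := out = aux_alt u c k s
instance (u : List Int) (c : List (List Int)) (k : Int) (s : List Int) (out : Bool) : Decidable (Spec_aux u c k s out) := by unfold Spec_aux; infer_instance

-- ===== CLAIM (what is proved, stated in full; the proofs are below) =====
def Claim_equal_aux : Prop := ∀ (u : List Int) (c : List (List Int)) (k : Int) (s : List Int), Dom_aux u c k s → Pre_aux u c k s → Spec_aux u c k s (aux u c k s)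

-- ===== LEMMAS AND PROOFS =====

-- membership in the running union
theorem mem_unionOf (c : List (List Int)) (acc : PySem.Set Int) (t : List Int) (y : Int) :
    y ∈ unionOf c acc t ↔ y ∈ acc ∨ ∃ i ∈ t, y ∈ (PySem.List.pyGet? c i).getD [] := by
  induction t generalizing acc with
  | nil => simp [unionOf]
  | cons a t ih =>
      simp only [unionOf, List.foldl_cons] at *
      rw [ih]
      simp [PySem.Set.mem_update]
      tauto

-- Python's c[n] for a Nat index agrees with Lean's getD (both give [] out of range)
theorem pyGetD_cast (c : List (List Int)) (n : Nat) :
    (PySem.List.pyGet? c (n : Int)).getD [] = c.getD n [] := by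
  by_cases h : n < c.length
  · simp [PySem.List.pyGet?, PySem.List.pyIdx?, h]
  · simp [PySem.List.pyGet?, PySem.List.pyIdx?, h]

-- "the sets indexed by s together with those indexed by t cover exactly u"
def CoverProp (u : List Int) (c : List (List Int)) (s t : List Int) : Prop :=
  ∀ y : Int, ((∃ i ∈ s, y ∈ (PySem.List.pyGet? c i).getD []) ∨
              (∃ i ∈ t, y ∈ (PySem.List.pyGet? c i).getD [])) ↔ y ∈ u

theorem mem_pyExtensions (c : List (List Int)) (s : List Int) (x : Int) :
    x ∈ pyExtensions c s ↔ (0 ≤ x ∧ x < (c.length : Int)) ∧ x ∉ s := by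
  simp [pyExtensions, List.mem_filter, PySem.List.mem_pyRange_one]

theorem pyValid_iff (u : List Int) (c : List (List Int)) (s : List Int) :
    pyValid u c s = true ↔ CoverProp u c s [] := by
  rw [pyValid, PySem.Set.equal_iff]
  unfold CoverProp
  constructor
  · intro h y; have := h y; rw [mem_unionOf] at this; simp [PySem.Set.empty] at this; simpa using this
  · intro h y; rw [mem_unionOf]; have := h y; simp [PySem.Set.empty]; simpa using this

theorem cover_step (u : List Int) (c : List (List Int)) (s t' : List Int) (x : Int) :
    CoverProp u c (s ++ [x]) t' ↔ CoverProp u c s (x :: t') := by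
  unfold CoverProp
  apply forall_congr'
  intro y
  apply iff_congr _ Iff.rfl
  constructor
  · rintro (⟨i, hi, hp⟩ | ⟨i, hi, hp⟩)
    · rcases List.mem_append.mp hi with h | h
      · exact Or.inl ⟨i, h, hp⟩
      · exact Or.inr ⟨i, List.mem_cons.mpr (Or.inl (by simpa using h)), hp⟩
    · exact Or.inr ⟨i, List.mem_cons.mpr (Or.inr hi), hp⟩
  · rintro (⟨i, hi, hp⟩ | ⟨i, hi, hp⟩)
    · exact Or.inl ⟨i, List.mem_append_left _ hi, hp⟩
    · rcases List.mem_cons.mp hi with rfl | h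
      · exact Or.inl ⟨i, List.mem_append_right _ (by simp), hp⟩
      · exact Or.inr ⟨i, h, hp⟩

-- A's result characterised: some duplicate-free list of fresh in-range indices completes s to length k and covers u
theorem aux_char (u : List Int) (c : List (List Int)) (k : Int) (s : List Int) :
    aux u c k s = true ↔
      ∃ t : List Int, t.Nodup ∧ (∀ x ∈ t, (0 ≤ x ∧ x < (c.length : Int)) ∧ x ∉ s) ∧
        (s.length : Int) + t.length = k ∧ CoverProp u c s t := by
  generalize hn : (pyExtensions c s).length = n
  induction n using Nat.strong_induction_on generalizing s with
  | _ n ih =>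
  rw [aux]
  by_cases hk : ((s.length : Int) == k) = true
  · rw [if_pos hk]
    replace hk : (s.length : Int) = k := by simpa using hk
    rw [pyValid_iff]
    constructor
    · intro hv
      exact ⟨[], List.nodup_nil, by simp, by simpa using hk, hv⟩
    · rintro ⟨t, hnd, hfr, hlen, hcov⟩
      have ht : t = [] := by
        have : (t.length : Int) = 0 := by omega
        exact List.eq_nil_of_length_eq_zero (by exact_mod_cast this)
      subst ht; exact hcov
  · rw [if_neg hk]
    replace hk : (s.length : Int) ≠ k := by simpa using hk
    rw [List.any_eq_true]
    constructor
    · rintro ⟨⟨x, hx⟩, -, hrec⟩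
      have hm := pyExtensions_append_lt hx
      rw [hn] at hm
      rw [ih _ hm (s ++ [x]) rfl] at hrec
      obtain ⟨t', hnd', hfr', hlen', hcov'⟩ := hrec
      obtain ⟨⟨hx0, hxl⟩, hxs⟩ := (mem_pyExtensions c s x).mp hx
      refine ⟨x :: t', ?_, ?_, ?_, ?_⟩
      · rw [List.nodup_cons]
        exact ⟨fun hmem => (hfr' x hmem).2 (by simp), hnd'⟩
      · intro z hz
        rcases List.mem_cons.mp hz with rfl | hz'
        · exact ⟨⟨hx0, hxl⟩, hxs⟩
        · obtain ⟨hb, hns⟩ := hfr' z hz'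
          exact ⟨hb, fun hzs => hns (List.mem_append_left _ hzs)⟩
      · simp only [List.length_cons, List.length_append, List.length_nil] at hlen' ⊢
        push_cast at hlen' ⊢
        omega
      · exact (cover_step u c s t' x).mp hcov'
    · rintro ⟨t, hnd, hfr, hlen, hcov⟩
      cases t with
      | nil => exact absurd (by simpa using hlen) hk
      | cons x t' =>
        have hxext : x ∈ pyExtensions c s := (mem_pyExtensions c s x).mpr ⟨(hfr x (by simp)).1, (hfr x (by simp)).2⟩
        refine ⟨⟨x, hxext⟩, List.mem_attach _ _, ?_⟩
        have hm := pyExtensions_append_lt hxext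
        rw [hn] at hm
        rw [ih _ hm (s ++ [x]) rfl]
        rw [List.nodup_cons] at hnd
        refine ⟨t', hnd.2, ?_, ?_, ?_⟩
        · intro z hz
          obtain ⟨hb, hns⟩ := hfr z (List.mem_cons_of_mem _ hz)
          refine ⟨hb, ?_⟩
          intro hmem
          rcases List.mem_append.mp hmem with h1 | h2
          · exact hns h1
          · have hzx : z = x := by simpa using h2
            exact hnd.1 (hzx ▸ hz)
        · simp only [List.length_cons, List.length_append, List.length_nil] at hlen ⊢
          push_cast at hlen ⊢
          omega
        · exact (cover_step u c s t' x).mpr hcov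

theorem mem_range_sub (pos n i : Nat) : i ∈ List.range' pos (n - pos) ↔ pos ≤ i ∧ i < n := by
  rw [List.mem_range'_1]; omega

-- B's inner loop characterised: a strictly increasing list of `left` positions ≥ pos covers u over acc
theorem goB_char (u : List Int) (c : List (List Int)) (fresh : List Nat) (left : Nat) :
    ∀ (pos : Nat) (acc : PySem.Set Int),
      goB u c fresh pos left acc = true ↔
        ∃ l : List Nat, l.Pairwise (· < ·) ∧ (∀ i ∈ l, pos ≤ i ∧ i < fresh.length) ∧
          l.length = left ∧
          (∀ y : Int, (y ∈ acc ∨ ∃ i ∈ l, y ∈ c.getD (fresh.getD i 0) []) ↔ y ∈ u) := by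
  induction left with
  | zero =>
      intro pos acc
      rw [goB, PySem.Set.equal_iff]
      constructor
      · intro h
        exact ⟨[], List.Pairwise.nil, by simp, rfl, by intro y; simpa using h y⟩
      · rintro ⟨l, -, -, hlen, hcov⟩
        have : l = [] := List.eq_nil_of_length_eq_zero hlen
        subst this
        intro y; simpa using hcov y
  | succ m ih =>
      intro pos acc
      rw [goB, List.any_eq_true]
      constructor
      · rintro ⟨i, hi, hrec⟩
        rw [mem_range_sub] at hi
        rw [ih] at hrec
        obtain ⟨l', hpw', hbd', hlen', hcov'⟩ := hrec
        refine ⟨i :: l', ?_, ?_, by simp [hlen'], ?_⟩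
        · rw [List.pairwise_cons]
          exact ⟨fun j hj => by have := (hbd' j hj).1; omega, hpw'⟩
        · intro j hj
          rcases List.mem_cons.mp hj with rfl | hj'
          · exact hi
          · have := hbd' j hj'; omega
        · intro y
          have := hcov' y
          rw [PySem.Set.union, PySem.Set.mem_update] at this
          simp only [List.mem_cons] at this ⊢
          constructor
          · rintro (hy | ⟨j, (rfl | hj), hp⟩)
            · exact this.mp (Or.inl (Or.inl hy))
            · exact this.mp (Or.inl (Or.inr hp))
            · exact this.mp (Or.inr ⟨j, hj, hp⟩)
          · intro hy
            rcases this.mpr hy with (ha | hx) | ⟨j, hj, hp⟩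
            · exact Or.inl ha
            · exact Or.inr ⟨i, Or.inl rfl, hx⟩
            · exact Or.inr ⟨j, Or.inr hj, hp⟩
      · rintro ⟨l, hpw, hbd, hlen, hcov⟩
        cases l with
        | nil => simp at hlen
        | cons i l' =>
          have hi := hbd i (by simp)
          refine ⟨i, (mem_range_sub pos fresh.length i).mpr hi, ?_⟩
          rw [ih]
          rw [List.pairwise_cons] at hpw
          refine ⟨l', hpw.2, ?_, by simpa using hlen, ?_⟩
          · intro j hj
            have := hbd j (List.mem_cons_of_mem _ hj)
            have := hpw.1 j hj
            omega
          · intro y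
            have := hcov y
            rw [PySem.Set.union, PySem.Set.mem_update]
            simp only [List.mem_cons] at this ⊢
            constructor
            · rintro ((ha | hx) | ⟨j, hj, hp⟩)
              · exact this.mp (Or.inl ha)
              · exact this.mp (Or.inr ⟨i, Or.inl rfl, hx⟩)
              · exact this.mp (Or.inr ⟨j, Or.inr hj, hp⟩)
            · intro hy
              rcases this.mpr hy with ha | ⟨j, (rfl | hj), hp⟩
              · exact Or.inl (Or.inl ha)
              · exact Or.inl (Or.inr hp)
              · exact Or.inr ⟨j, hj, hp⟩

-- the combinatorial bridge: a duplicate-free list of fresh index VALUES exists iff a strictly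
-- increasing list of POSITIONS into the fresh list exists (union compared through membership)
theorem bridge (u : List Int) (c : List (List Int)) (k : Int) (s : List Int)
    (base : PySem.Set Int)
    (hbase : ∀ y : Int, y ∈ base ↔ ∃ i ∈ s, y ∈ (PySem.List.pyGet? c i).getD [])
    (hk : 0 ≤ k - (s.length : Int)) :
    (∃ t : List Int, t.Nodup ∧ (∀ x ∈ t, (0 ≤ x ∧ x < (c.length : Int)) ∧ x ∉ s) ∧
        (s.length : Int) + t.length = k ∧ CoverProp u c s t)
    ↔ (∃ l : List Nat, l.Pairwise (· < ·) ∧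
        (∀ i ∈ l, 0 ≤ i ∧ i < ((List.range c.length).filter (fun x : Nat => !s.contains (x : Int))).length) ∧
        l.length = (k - (s.length : Int)).toNat ∧
        (∀ y : Int, (y ∈ base ∨ ∃ i ∈ l, y ∈ c.getD
          (((List.range c.length).filter (fun x : Nat => !s.contains (x : Int))).getD i 0) []) ↔ y ∈ u)) := by
  set F := (List.range c.length).filter (fun x : Nat => !s.contains (x : Int)) with hF
  have hfnd : F.Nodup := List.Nodup.filter _ List.nodup_range
  have hfmem : ∀ n : Nat, n ∈ F ↔ n < c.length ∧ ((n : Int) ∉ s) := by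
    intro n; rw [hF]; simp [List.mem_filter, List.mem_range]
  have hinj : ∀ l : List Nat, (∀ i ∈ l, i < F.length) → l.Nodup →
      (l.map (fun i => ((F.getD i 0 : Nat) : Int))).Nodup := by
    intro l hbd hlnd
    refine List.Nodup.map_on ?_ hlnd
    intro i hi j hj hij
    have hi' := hbd i hi
    have hj' := hbd j hj
    have : F.getD i 0 = F.getD j 0 := by exact_mod_cast hij
    rw [List.getD_eq_getElem F 0 hi', List.getD_eq_getElem F 0 hj'] at this
    exact (hfnd.getElem_inj_iff).mp this
  constructor
  · rintro ⟨t, hnd, hfr, hlen, hcov⟩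
    set l := (List.range F.length).filter (fun i => decide (((F.getD i 0 : Nat) : Int) ∈ t)) with hl
    have hbd : ∀ i ∈ l, i < F.length := by
      intro i hi
      exact List.mem_range.mp ((List.mem_filter.mp hi).1)
    have hlnd : l.Nodup := List.Nodup.sublist List.filter_sublist List.nodup_range
    have hv : ∀ x : Int, (∃ i ∈ l, ((F.getD i 0 : Nat) : Int) = x) ↔ x ∈ t := by
      intro x
      constructor
      · rintro ⟨i, hi, rfl⟩
        have := (List.mem_filter.mp hi).2
        simpa using this
      · intro hx
        obtain ⟨⟨hx0, hxl⟩, hxs⟩ := hfr x hx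
        have hxF : x.toNat ∈ F := by
          rw [hfmem]
          constructor
          · omega
          · rwa [Int.toNat_of_nonneg hx0]
        obtain ⟨i, hilt, hget⟩ := List.mem_iff_getElem.mp hxF
        have hgd : F.getD i 0 = x.toNat := by rw [List.getD_eq_getElem F 0 hilt, hget]
        have hcast : ((F.getD i 0 : Nat) : Int) = x := by
          rw [hgd]; exact Int.toNat_of_nonneg hx0
        refine ⟨i, ?_, hcast⟩
        rw [hl, List.mem_filter]
        exact ⟨List.mem_range.mpr hilt, by rw [decide_eq_true_eq, hcast]; exact hx⟩
    have hvals : ∀ x : Int, x ∈ l.map (fun i => ((F.getD i 0 : Nat) : Int)) ↔ x ∈ t := by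
      intro x; rw [List.mem_map]
      constructor
      · rintro ⟨i, hi, rfl⟩; exact (hv _).mp ⟨i, hi, rfl⟩
      · intro hx; obtain ⟨i, hi, he⟩ := (hv x).mpr hx; exact ⟨i, hi, he⟩
    have hlenlt : l.length = t.length := by
      have hp := (List.perm_ext_iff_of_nodup (hinj l hbd hlnd) hnd).mpr hvals
      simpa using hp.length_eq
    refine ⟨l, ?_, ?_, ?_, ?_⟩
    · exact List.Pairwise.sublist List.filter_sublist List.pairwise_lt_range
    · intro i hi; exact ⟨Nat.zero_le i, hbd i hi⟩
    · omega
    · intro y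
      rw [hbase y]
      have hQ : (∃ i ∈ l, y ∈ c.getD (F.getD i 0) []) ↔ ∃ i ∈ t, y ∈ (PySem.List.pyGet? c i).getD [] := by
        constructor
        · rintro ⟨i, hi, hq⟩
          refine ⟨((F.getD i 0 : Nat) : Int), (hv _).mp ⟨i, hi, rfl⟩, ?_⟩
          rwa [pyGetD_cast]
        · rintro ⟨x, hx, hp⟩
          obtain ⟨i, hi, he⟩ := (hv x).mpr hx
          refine ⟨i, hi, ?_⟩
          rw [← pyGetD_cast, he]
          exact hp
      rw [hQ]
      exact hcov y
  · rintro ⟨l, hpw, hbd, hlen, hcov⟩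
    have hlnd : l.Nodup := hpw.imp fun h => Nat.ne_of_lt h
    have hbd' : ∀ i ∈ l, i < F.length := fun i hi => (hbd i hi).2
    refine ⟨l.map (fun i => ((F.getD i 0 : Nat) : Int)), hinj l hbd' hlnd, ?_, ?_, ?_⟩
    · rintro x hx
      obtain ⟨i, hi, rfl⟩ := List.mem_map.mp hx
      have hmemF : F.getD i 0 ∈ F := by
        rw [List.getD_eq_getElem F 0 (hbd' i hi)]
        exact List.getElem_mem _
      obtain ⟨hlt, hns⟩ := (hfmem _).mp hmemF
      exact ⟨⟨Int.natCast_nonneg _, by exact_mod_cast hlt⟩, hns⟩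
    · simp only [List.length_map]
      omega
    · intro y
      have := hcov y
      rw [hbase y] at this
      rw [← this]
      apply or_congr Iff.rfl
      constructor
      · rintro ⟨x, hx, hp⟩
        obtain ⟨i, hi, rfl⟩ := List.mem_map.mp hx
        refine ⟨i, hi, ?_⟩
        rwa [pyGetD_cast] at hp
      · rintro ⟨i, hi, hq⟩
        refine ⟨((F.getD i 0 : Nat) : Int), List.mem_map.mpr ⟨i, hi, rfl⟩, ?_⟩
        rwa [pyGetD_cast]

-- ===== VERDICT (by name: the statement is the Claim_ definition above) =====
theorem aux_spec : Claim_equal_aux := by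
  intro u c k s _ _
  unfold Spec_aux
  rw [Bool.eq_iff_iff, aux_char]
  simp only [aux_alt]
  split_ifs with h1 h2
  · simp only [iff_false]
    rintro ⟨t, -, -, hlen, -⟩
    have : (0:Int) ≤ t.length := Int.natCast_nonneg _
    omega
  · simp only [iff_false]
    rintro ⟨t, hnd, hfr, hlen, -⟩
    have hndN : (t.map Int.toNat).Nodup := by
      refine List.Nodup.map_on ?_ hnd
      intro x hx y hy hxy
      have := (hfr x hx).1
      have := (hfr y hy).1
      omega
    have hsub : (t.map Int.toNat) ⊆ (List.range c.length).filter (fun x : Nat => !s.contains (x : Int)) := by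
      intro z hz
      obtain ⟨x, hx, rfl⟩ := List.mem_map.mp hz
      obtain ⟨⟨hx0, hxl⟩, hxs⟩ := hfr x hx
      simp only [List.mem_filter, List.mem_range]
      constructor
      · omega
      · have : ((x.toNat : Nat) : Int) = x := Int.toNat_of_nonneg hx0
        simpa [this] using hxs
    have := (List.subperm_of_subset hndN hsub).length_le
    simp only [List.length_map] at this
    omega
  · rw [goB_char]
    apply bridge u c k s _ _ (by omega)
    intro y
    have : (s.foldl (fun r i => PySem.Set.union r ((PySem.List.pyGet? c i).getD [])) PySem.Set.empty) = unionOf c PySem.Set.empty s := rfl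
    rw [this, mem_unionOf]
    simp [PySem.Set.empty]
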